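-- pv_equiv track=rewrite | github.com/utkuseyithanoglu/monthly-sales-analyzer-project | monthly_sales_analyzer.py | top_product
-- ===== SOURCE A (Python) =====
-- def top_product(data):
--     """Determines which product had the highest total sales in 30 days."""
--     highest_a = 0
--     highest_b = 0
--     highest_c = 0
--     for i in data:
--         for a, b in i.items():
--             if a=="product_a":
--                 highest_a+=b
--             if a=="product_b":
--                 highest_b+=b
--             if a=="product_c":
--                 highest_c+=b
--     return max(highest_a, highest_b, highest_c)
-- ===== SOURCE B (Python) =====
-- def top_product(data):
--     """Determines which product had the highest total sales in 30 days."""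
--     def totals(lo, hi):
--         # (sum of product_a, product_b, product_c) over data[lo:hi], by halving
--         if hi <= lo:
--             return (0, 0, 0)
--         if hi == lo + 1:
--             d = data[lo]
--             return (d.get("product_a", 0), d.get("product_b", 0), d.get("product_c", 0))
--         mid = (lo + hi) // 2
--         la, lb, lc = totals(lo, mid)
--         ra, rb, rc = totals(mid, hi)
--         return (la + ra, lb + rb, lc + rc)
--     a, b, c = totals(0, len(data))
--     return max(a, b, c)
-- ===== Notes on version B (the rewrite author's own statement) =====
-- stated objective: alternative
-- what changed: Replaced A's single iterative pass that branches on every key of every dict with a divide-and-conquer recursion: totals(lo,hi) halves the index range, each leaf reads the three product keys of one dict via .get(...,0), and tuples are combined componentwise; the max of the final tuple is returned.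
import Mathlib
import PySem

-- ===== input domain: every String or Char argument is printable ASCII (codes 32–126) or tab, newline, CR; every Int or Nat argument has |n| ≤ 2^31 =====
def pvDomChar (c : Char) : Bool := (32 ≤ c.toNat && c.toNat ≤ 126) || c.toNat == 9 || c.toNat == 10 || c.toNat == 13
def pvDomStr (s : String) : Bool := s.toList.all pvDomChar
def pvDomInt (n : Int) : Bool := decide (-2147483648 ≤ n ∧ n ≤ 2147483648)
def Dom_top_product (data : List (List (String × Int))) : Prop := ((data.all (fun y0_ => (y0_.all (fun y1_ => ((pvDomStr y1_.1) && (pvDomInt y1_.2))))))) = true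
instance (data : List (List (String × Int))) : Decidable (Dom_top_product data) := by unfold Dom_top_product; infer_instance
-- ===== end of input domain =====

-- B replaces A's single iterative pass branching on every key by a divide-and-conquer
-- recursion over index ranges, combining per-product total tuples; objective: alternative.

-- ===== PORT A =====
-- one pass over data, inner loop over each dict's items, branching on the key
def top_product (data : List (List (String × Int))) : Int :=
  let s := data.foldl (fun (s : Int × Int × Int) i =>
    i.foldl (fun (s : Int × Int × Int) ab =>
      let s := if ab.1 == "product_a" then (s.1 + ab.2, s.2.1, s.2.2) else s
      let s := if ab.1 == "product_b" then (s.1, s.2.1 + ab.2, s.2.2) else s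
      if ab.1 == "product_c" then (s.1, s.2.1, s.2.2 + ab.2) else s) s)
    (0, 0, 0)
  max s.1 (max s.2.1 s.2.2)

-- ===== PORT B =====
-- totals lo hi = (sums of the three product keys over data[lo:hi]), by halving the range.
-- data[lo] is only read with lo in range, so it is ported as data.getD lo [] (exact there);
-- d.get(k, 0) is (PySem.Dict.mk d).getD k 0.
-- fuel is a totality guard only: called with fuel = data.length ≥ hi - lo, which each
-- recursive call preserves, so the 0-fuel branch is never reached.
def tpTotals (data : List (List (String × Int))) (fuel lo hi : Nat) : Int × Int × Int :=
  match fuel with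
  | 0 => (0, 0, 0)
  | fuel + 1 =>
    if hi ≤ lo then (0, 0, 0)
    else if hi = lo + 1 then
      let d := data.getD lo []
      ((PySem.Dict.mk d).getD "product_a" 0,
       (PySem.Dict.mk d).getD "product_b" 0,
       (PySem.Dict.mk d).getD "product_c" 0)
    else
      let mid := (lo + hi) / 2
      let l := tpTotals data fuel lo mid
      let r := tpTotals data fuel mid hi
      (l.1 + r.1, l.2.1 + r.2.1, l.2.2 + r.2.2)

def top_product_alt (data : List (List (String × Int))) : Int :=
  let t := tpTotals data data.length 0 data.length
  max t.1 (max t.2.1 t.2.2)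

-- ===== PRECONDITION & SPEC =====
-- Pre_ requires each inner association list to have distinct keys: that is the invariant of the
-- Python dicts A iterates over, so it excludes no input representable on the Python side.
def Pre_top_product (data : List (List (String × Int))) : Prop :=
  ∀ i ∈ data, (i.map Prod.fst).Nodup
instance (data : List (List (String × Int))) : Decidable (Pre_top_product data) := by
  unfold Pre_top_product; infer_instance

def pvWitness_top_product : (List (List (String × Int))) :=
  [[("product_a", 3), ("product_b", 5)], [("product_c", 2), ("x", 9)]]

def Spec_top_product (data : List (List (String × Int))) (out : Int) : Prop := out = top_product_alt data
instance (data : List (List (String × Int))) (out : Int) : Decidable (Spec_top_product data out) := by unfold Spec_top_product; infer_instance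

-- ===== CLAIM (what is proved, stated in full; the proofs are below) =====
def Claim_equal_top_product : Prop := ∀ (data : List (List (String × Int))), Dom_top_product data → Pre_top_product data → Spec_top_product data (top_product data)

-- ===== LEMMAS AND PROOFS =====

theorem getD_zero_of_not_mem (x : String) (tl : List (String × Int))
    (h : ∀ p ∈ tl, p.1 ≠ x) : (PySem.Dict.mk tl).getD x 0 = 0 := by
  induction tl with
  | nil => simp [PySem.Dict.getD, PySem.Dict.get?]
  | cons q qs ih =>
    obtain ⟨qk, qv⟩ := q
    simp only [PySem.Dict.getD, PySem.Dict.get?_mk_cons] at *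
    rw [if_neg (by simpa using h (qk, qv) (by simp))]
    exact ih (fun p hp => h p (List.mem_cons_of_mem _ hp))

theorem body_eq (s : Int × Int × Int) (k : String) (v : Int) :
    (let s1 := if k == "product_a" then (s.1 + v, s.2.1, s.2.2) else s
     let s2 := if k == "product_b" then (s1.1, s1.2.1 + v, s1.2.2) else s1
     if k == "product_c" then (s2.1, s2.2.1, s2.2.2 + v) else s2)
    = (s.1 + (if k = "product_a" then v else 0),
       s.2.1 + (if k = "product_b" then v else 0),
       s.2.2 + (if k = "product_c" then v else 0)) := by
  simp only [beq_iff_eq]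
  split_ifs <;> simp

-- inner loop over one dict's items adds, to each component, the value stored at that key
theorem inner_loop_eq (i : List (String × Int)) (hnd : (i.map Prod.fst).Nodup) (s : Int × Int × Int) :
    i.foldl (fun (s : Int × Int × Int) ab =>
      let s := if ab.1 == "product_a" then (s.1 + ab.2, s.2.1, s.2.2) else s
      let s := if ab.1 == "product_b" then (s.1, s.2.1 + ab.2, s.2.2) else s
      if ab.1 == "product_c" then (s.1, s.2.1, s.2.2 + ab.2) else s) s
    = (s.1 + (PySem.Dict.mk i).getD "product_a" 0,
       s.2.1 + (PySem.Dict.mk i).getD "product_b" 0,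
       s.2.2 + (PySem.Dict.mk i).getD "product_c" 0) := by
  induction i generalizing s with
  | nil => simp [PySem.Dict.getD, PySem.Dict.get?]
  | cons hd tl ih =>
    obtain ⟨k, v⟩ := hd
    simp only [List.map_cons, List.nodup_cons] at hnd
    have hnotmem : ∀ p ∈ tl, p.1 ≠ k := by
      intro p hp h; exact hnd.1 (h ▸ List.mem_map_of_mem hp)
    have hkey : ∀ (x : String),
        (if k = x then v else 0) + (PySem.Dict.mk tl).getD x 0
          = (PySem.Dict.mk ((k, v) :: tl)).getD x 0 := by
      intro x
      by_cases hx : k = x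
      · subst hx
        rw [if_pos rfl, getD_zero_of_not_mem k tl hnotmem]
        simp [PySem.Dict.getD, PySem.Dict.get?_mk_cons]
      · rw [if_neg hx]
        simp [PySem.Dict.getD, PySem.Dict.get?_mk_cons, hx]
    rw [List.foldl_cons, ih hnd.2, body_eq s k v]
    dsimp only
    rw [add_assoc, add_assoc, add_assoc,
        hkey "product_a", hkey "product_b", hkey "product_c"]

-- segment sums, the common value of both loops
def tpSums (seg : List (List (String × Int))) : Int × Int × Int :=
  ((seg.map (fun i => (PySem.Dict.mk i).getD "product_a" 0)).sum,
   (seg.map (fun i => (PySem.Dict.mk i).getD "product_b" 0)).sum,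
   (seg.map (fun i => (PySem.Dict.mk i).getD "product_c" 0)).sum)

theorem outer_loop_eq (data : List (List (String × Int))) (hnd : ∀ i ∈ data, (i.map Prod.fst).Nodup)
    (s : Int × Int × Int) :
    data.foldl (fun (s : Int × Int × Int) i =>
      i.foldl (fun (s : Int × Int × Int) ab =>
        let s := if ab.1 == "product_a" then (s.1 + ab.2, s.2.1, s.2.2) else s
        let s := if ab.1 == "product_b" then (s.1, s.2.1 + ab.2, s.2.2) else s
        if ab.1 == "product_c" then (s.1, s.2.1, s.2.2 + ab.2) else s) s) s
    = (s.1 + (tpSums data).1, s.2.1 + (tpSums data).2.1, s.2.2 + (tpSums data).2.2) := by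
  induction data generalizing s with
  | nil => simp [tpSums]
  | cons hd tl ih =>
    simp only [List.foldl_cons]
    rw [inner_loop_eq hd (hnd hd (by simp)) s,
        ih (fun i hi => hnd i (List.mem_cons_of_mem _ hi))]
    simp only [tpSums, List.map_cons, List.sum_cons]
    ring_nf

theorem tpSums_append (xs ys : List (List (String × Int))) :
    tpSums (xs ++ ys)
      = ((tpSums xs).1 + (tpSums ys).1, (tpSums xs).2.1 + (tpSums ys).2.1,
         (tpSums xs).2.2 + (tpSums ys).2.2) := by
  simp [tpSums]

-- the divide-and-conquer recursion computes the segment sums of data[lo:hi]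
theorem tpTotals_eq (data : List (List (String × Int))) :
    ∀ (fuel lo hi : Nat), hi - lo ≤ fuel → hi ≤ data.length →
      tpTotals data fuel lo hi = tpSums ((data.drop lo).take (hi - lo)) := by
  intro fuel
  induction fuel with
  | zero =>
    intro lo hi hn _
    have : hi - lo = 0 := by omega
    simp [tpTotals, this, tpSums]
  | succ n ih =>
    intro lo hi hn hlen
    rw [tpTotals]
    by_cases h0 : hi ≤ lo
    · rw [if_pos h0]
      have : hi - lo = 0 := by omega
      simp [this, tpSums]
    · rw [if_neg h0]
      by_cases h1 : hi = lo + 1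
      · rw [if_pos h1]
        have hlt : lo < data.length := by omega
        have htk : (data.drop lo).take (hi - lo) = [data[lo]] := by
          rw [show hi - lo = 1 by omega]
          exact List.take_one_drop_eq_of_lt_length hlt
        rw [htk]
        simp [tpSums, List.getD, List.getElem?_eq_getElem hlt]
      · rw [if_neg h1]
        have hmid1 : lo < (lo + hi) / 2 := by omega
        have hmid2 : (lo + hi) / 2 < hi := by omega
        have hsplit : (data.drop lo).take (hi - lo)
            = (data.drop lo).take ((lo + hi) / 2 - lo)
              ++ (data.drop ((lo + hi) / 2)).take (hi - (lo + hi) / 2) := by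
          have h2 : hi - lo = ((lo + hi) / 2 - lo) + (hi - (lo + hi) / 2) := by omega
          have h3 : lo + ((lo + hi) / 2 - lo) = (lo + hi) / 2 := by omega
          have h3' : (lo + hi) / 2 - lo + lo = (lo + hi) / 2 := by omega
          rw [h2, List.take_add, List.drop_drop]
          simp only [h3, h3']  -- either orientation of drop_drop
        simp only [ih lo ((lo + hi) / 2) (by omega) (by omega),
          ih ((lo + hi) / 2) hi (by omega) hlen,
          hsplit, tpSums_append]
  
-- ===== VERDICT (by name: the statement is the Claim_ definition above) =====
theorem top_product_spec : Claim_equal_top_product := by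
  intro data _ hpre
  unfold Spec_top_product top_product top_product_alt
  rw [outer_loop_eq data hpre (0, 0, 0),
      tpTotals_eq data data.length 0 data.length (by omega) (le_refl _)]
  simp [tpSums]
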